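-- pv_equiv track=rewrite | github.com/zou-group/humanlm | humanual_datasets/humanual_email.py | _split_by_time_gap
-- ===== SOURCE A (Python) =====
-- from typing import Dict, List, Optional
--
-- def _split_by_time_gap(emails: List[Dict], gap_seconds: int) -> List[List[Dict]]:
--     if not emails:
--         return []
--     emails = sorted(emails, key=lambda e: e.get("timestamp") or 0)
--     threads: List[List[Dict]] = []
--     cur: List[Dict] = [emails[0]]
--     for e in emails[1:]:
--         prev_ts = int(cur[-1].get("timestamp") or 0)
--         ts = int(e.get("timestamp") or 0)
--         if ts - prev_ts > gap_seconds:
--             threads.append(cur)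
--             cur = [e]
--         else:
--             cur.append(e)
--     threads.append(cur)
--     return threads
-- ===== SOURCE B (Python) =====
-- def _split_by_time_gap(emails, gap_seconds):
--     s = sorted(emails, key=lambda e: e.get("timestamp") or 0)
--
--     def split(rest):
--         # divide and conquer: thread each half, then merge across the midpoint
--         if len(rest) <= 1:
--             return [rest] if rest else []
--         mid = len(rest) // 2
--         left = split(rest[:mid])
--         right = split(rest[mid:])
--         if int(rest[mid].get("timestamp") or 0) - int(rest[mid - 1].get("timestamp") or 0) > gap_seconds:
--             return left + right
--         return left[:-1] + [left[-1] + right[0]] + right[1:]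
--
--     return split(s)
-- ===== Notes on version B (the rewrite author's own statement) =====
-- stated objective: alternative
-- what changed: A threads the sorted list with a single left-to-right fold carrying a (threads, current-group) accumulator; B instead uses divide and conquer: it recursively threads each half of the sorted list and then merges across the midpoint, concatenating the two thread lists or fusing the boundary threads depending on the midpoint gap.
import Mathlib
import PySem

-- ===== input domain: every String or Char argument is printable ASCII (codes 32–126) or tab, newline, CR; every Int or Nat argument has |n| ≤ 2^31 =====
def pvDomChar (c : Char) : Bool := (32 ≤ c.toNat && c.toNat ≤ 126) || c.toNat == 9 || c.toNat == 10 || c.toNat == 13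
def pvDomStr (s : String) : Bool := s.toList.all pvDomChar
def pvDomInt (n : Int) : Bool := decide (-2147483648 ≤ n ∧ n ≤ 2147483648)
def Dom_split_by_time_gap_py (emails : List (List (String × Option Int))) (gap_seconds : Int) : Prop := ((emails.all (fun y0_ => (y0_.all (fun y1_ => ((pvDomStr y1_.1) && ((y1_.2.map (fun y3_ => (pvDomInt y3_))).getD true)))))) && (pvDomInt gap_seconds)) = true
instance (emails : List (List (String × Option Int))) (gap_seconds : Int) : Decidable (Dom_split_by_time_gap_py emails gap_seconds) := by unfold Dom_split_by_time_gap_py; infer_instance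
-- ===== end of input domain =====

-- B replaces A's single left-to-right fold by divide and conquer on the sorted list:
-- thread each half recursively, then merge across the midpoint (objective: alternative).

-- `e.get("timestamp") or 0` as an Int; `int()` on an int is the identity, so the sort key
-- and the gap comparisons compute the same function (shared by both ports).
def pyTs (e : List (String × Option Int)) : Int :=
  match PySem.Dict.get? (PySem.Dict.mk e) "timestamp" with
  | some (some v) => v
  | _ => 0

-- ===== PORT A =====
def split_by_time_gap_py (emails : List (List (String × Option Int))) (gap_seconds : Int) : List (List (List (String × Option Int))) :=
  if emails.isEmpty then []
  else
    let s := PySem.List.sorted emails pyTs false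
    let r := (PySem.List.slice s (some 1) none).foldl
      (fun (st : List (List (List (String × Option Int))) × List (List (String × Option Int))) e =>
        let prev_ts := pyTs (PySem.List.pyGetD st.2 (-1) [])   -- cur[-1]; cur is never empty
        let ts := pyTs e
        if ts - prev_ts > gap_seconds then (st.1 ++ [st.2], [e]) else (st.1, st.2 ++ [e]))
      ([], [PySem.List.pyGetD s 0 []])                          -- emails[0]; s is nonempty here
    r.1 ++ [r.2]

-- ===== PORT B =====
-- Source B's inner `split` (a closure over gap_seconds): divide and conquer; Source B's locals
-- mid / left / right are inlined (mid = len(rest)//2).  left[-1] and right[0] are ported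
-- with pyGetD default [] — both lists are nonempty there.
def pvSplit (g : Int) (rest : List (List (String × Option Int))) : List (List (List (String × Option Int))) :=
  if _h : rest.length ≤ 1 then
    (if rest.isEmpty then [] else [rest])
  else
    if pyTs (PySem.List.pyGetD rest ((rest.length / 2 : Nat) : Int) []) -
        pyTs (PySem.List.pyGetD rest (((rest.length / 2 : Nat) : Int) - 1) []) > g then
      pvSplit g (PySem.List.slice rest none (some ((rest.length / 2 : Nat) : Int))) ++
        pvSplit g (PySem.List.slice rest (some ((rest.length / 2 : Nat) : Int)) none)
    else
      PySem.List.slice (pvSplit g (PySem.List.slice rest none (some ((rest.length / 2 : Nat) : Int)))) none (some (-1)) ++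
        [PySem.List.pyGetD (pvSplit g (PySem.List.slice rest none (some ((rest.length / 2 : Nat) : Int)))) (-1) [] ++
          PySem.List.pyGetD (pvSplit g (PySem.List.slice rest (some ((rest.length / 2 : Nat) : Int)) none)) 0 []] ++
        PySem.List.slice (pvSplit g (PySem.List.slice rest (some ((rest.length / 2 : Nat) : Int)) none)) (some 1) none
termination_by rest.length
decreasing_by
  all_goals
    first
      | (rw [PySem.List.slice_to_natCast]; simp only [List.length_take]; omega)
      | (rw [PySem.List.slice_from_natCast]; simp only [List.length_drop]; omega)

def split_by_time_gap_py_alt (emails : List (List (String × Option Int))) (gap_seconds : Int) : List (List (List (String × Option Int))) :=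
  pvSplit gap_seconds (PySem.List.sorted emails pyTs false)

-- ===== PRECONDITION & SPEC =====
def Spec_split_by_time_gap_py (emails : List (List (String × Option Int))) (gap_seconds : Int) (out : List (List (List (String × Option Int)))) : Prop := out = split_by_time_gap_py_alt emails gap_seconds
instance (emails : List (List (String × Option Int))) (gap_seconds : Int) (out : List (List (List (String × Option Int)))) : Decidable (Spec_split_by_time_gap_py emails gap_seconds out) := by unfold Spec_split_by_time_gap_py; infer_instance

-- ===== CLAIM (what is proved, stated in full; the proofs are below) =====
def Claim_equal_split_by_time_gap_py : Prop := ∀ (emails : List (List (String × Option Int))) (gap_seconds : Int), Dom_split_by_time_gap_py emails gap_seconds → Spec_split_by_time_gap_py emails gap_seconds (split_by_time_gap_py emails gap_seconds)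

-- ===== LEMMAS AND PROOFS =====

-- the left-to-right grouping A's fold performs, as a proof-layer recursion
def pvRun (g : Int) (cur : List (List (String × Option Int))) :
    List (List (String × Option Int)) → List (List (List (String × Option Int)))
  | [] => [cur]
  | e :: rest =>
    if pyTs e - pyTs (cur.getLastD []) > g then cur :: pvRun g [e] rest
    else pvRun g (cur ++ [e]) rest

lemma pvRun_ne_nil (g : Int) (cur : List (List (String × Option Int)))
    (rest : List (List (String × Option Int))) : pvRun g cur rest ≠ [] := by
  induction rest generalizing cur with
  | nil => simp [pvRun]
  | cons e rest ih =>
    simp only [pvRun]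
    split_ifs
    · simp
    · exact ih _

lemma pvGetLastD_append {α : Type} (a b : List α) (d : α) (h : b ≠ []) :
    (a ++ b).getLastD d = b.getLastD d := by
  simp [List.getLastD_eq_getLast?, List.getLast?_eq_getLast_of_ne_nil h,
    List.getLast?_append_of_ne_nil _ h]

lemma pvGetLastD_cons {α : Type} (x : α) (l : List α) (d : α) (h : l ≠ []) :
    (x :: l).getLastD d = l.getLastD d := pvGetLastD_append [x] l d h

lemma pvGetLastD_eq_getLast {α : Type} (l : List α) (d : α) (h : l ≠ []) :
    l.getLastD d = l.getLast h := by
  simp [List.getLastD_eq_getLast?, List.getLast?_eq_getLast_of_ne_nil h]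

lemma pvFold_eq_run (g : Int) (rest : List (List (String × Option Int))) :
    ∀ (acc : List (List (List (String × Option Int)))) (cur : List (List (String × Option Int))),
      cur ≠ [] →
      (rest.foldl
        (fun (st : List (List (List (String × Option Int))) × List (List (String × Option Int))) e =>
          if pyTs e - pyTs (PySem.List.pyGetD st.2 (-1) []) > g then (st.1 ++ [st.2], [e])
          else (st.1, st.2 ++ [e]))
        (acc, cur)).1 ++
      [(rest.foldl
        (fun (st : List (List (List (String × Option Int))) × List (List (String × Option Int))) e =>
          if pyTs e - pyTs (PySem.List.pyGetD st.2 (-1) []) > g then (st.1 ++ [st.2], [e])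
          else (st.1, st.2 ++ [e]))
        (acc, cur)).2] = acc ++ pvRun g cur rest := by
  induction rest with
  | nil => intro acc cur _; simp [pvRun]
  | cons e rest ih =>
    intro acc cur hc
    simp only [List.foldl_cons, pvRun]
    rw [PySem.List.pyGetD_neg_one _ _ hc, ← pvGetLastD_eq_getLast cur [] hc]
    by_cases hgap : pyTs e - pyTs (cur.getLastD []) > g
    · simp only [if_pos hgap]
      rw [ih (acc ++ [cur]) [e] (by simp)]
      simp
    · simp only [if_neg hgap]
      exact ih acc (cur ++ [e]) (by simp)

lemma pvRun_prefix (g : Int) (rest : List (List (String × Option Int))) :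
    ∀ (c0 cur : List (List (String × Option Int))), cur ≠ [] →
      pvRun g (c0 ++ cur) rest = (pvRun g cur rest).modifyHead (c0 ++ ·) := by
  induction rest with
  | nil => intro c0 cur _; simp [pvRun]
  | cons e rest ih =>
    intro c0 cur hc
    simp only [pvRun, pvGetLastD_append _ _ _ hc]
    by_cases hgap : pyTs e - pyTs (cur.getLastD []) > g
    · simp only [if_pos hgap]
      simp
    · simp only [if_neg hgap]
      rw [List.append_assoc]
      exact ih c0 (cur ++ [e]) (by simp)

lemma pvRun_append (g : Int) (a b : List (List (String × Option Int))) :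
    ∀ (cur : List (List (String × Option Int))),
      pvRun g cur (a ++ b) =
        (pvRun g cur a).dropLast ++ pvRun g ((pvRun g cur a).getLastD []) b := by
  induction a with
  | nil => intro cur; simp [pvRun]
  | cons e a ih =>
    intro cur
    simp only [List.cons_append, pvRun]
    by_cases hgap : pyTs e - pyTs (cur.getLastD []) > g
    · simp only [if_pos hgap]
      rw [ih [e], List.dropLast_cons_of_ne_nil (pvRun_ne_nil g [e] a),
        pvGetLastD_cons _ _ _ (pvRun_ne_nil g [e] a), List.cons_append]
    · simp only [if_neg hgap]
      exact ih (cur ++ [e])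

lemma pvRun_last_elem (g : Int) (rest : List (List (String × Option Int))) :
    ∀ (cur : List (List (String × Option Int))), cur ≠ [] →
      ((pvRun g cur rest).getLastD []).getLastD [] = (cur ++ rest).getLastD [] := by
  induction rest with
  | nil => intro cur hc; simp [pvRun]
  | cons e rest ih =>
    intro cur hc
    simp only [pvRun]
    have hner : (e :: rest : List (List (String × Option Int))) ≠ [] := by simp
    by_cases hgap : pyTs e - pyTs (cur.getLastD []) > g
    · simp only [if_pos hgap]
      rw [pvGetLastD_cons _ _ _ (pvRun_ne_nil g [e] rest), ih [e] (by simp),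
        pvGetLastD_append cur _ _ hner]
      simp only [List.singleton_append]
    · simp only [if_neg hgap]
      rw [ih (cur ++ [e]) (by simp), List.append_assoc]
      simp only [List.singleton_append]

-- divide and conquer computes the same grouping as the left-to-right run
lemma pvSplit_eq_run (g : Int) :
    ∀ (n : Nat) (y : List (String × Option Int)) (yt : List (List (String × Option Int))),
      (y :: yt).length ≤ n → pvSplit g (y :: yt) = pvRun g [y] yt := by
  intro n
  induction n with
  | zero => intro y yt h; simp at h
  | succ n ih =>
    intro y yt hlen
    by_cases h1 : yt = []
    · subst h1; rw [pvSplit]; simp [pvRun]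
    · have hyt : 0 < yt.length := List.length_pos_iff.mpr h1
      have hlen' : yt.length ≤ n := by simp only [List.length_cons] at hlen; omega
      have hlt : ¬ (y :: yt).length ≤ 1 := by simp only [List.length_cons]; omega
      rw [pvSplit, dif_neg hlt]
      generalize hys : (y :: yt : List (List (String × Option Int))) = ys
      have hyslen : ys.length = yt.length + 1 := by rw [← hys]; simp
      set mid := ys.length / 2 with hmid
      clear_value mid
      have hmid1 : 1 ≤ mid := by omega
      have hmidlt : mid < ys.length := by omega
      rw [PySem.List.slice_to_natCast, PySem.List.slice_from_natCast]
      have htake : ys.take mid = y :: yt.take (mid - 1) := by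
        rw [← hys, show mid = (mid - 1) + 1 by omega, List.take_succ_cons]
        simp
      have hdrop : ys.drop mid = yt.drop (mid - 1) := by
        rw [← hys, show mid = (mid - 1) + 1 by omega, List.drop_succ_cons]
        simp
      have hvne : ys.drop mid ≠ [] := by
        intro hv
        have := congrArg List.length hv
        simp at this
        omega
      obtain ⟨v0, vt, hv⟩ := List.exists_cons_of_ne_nil hvne
      have hvlen := congrArg List.length hv
      simp only [List.length_drop, List.length_cons] at hvlen
      -- recursive calls
      have hleft : pvSplit g (ys.take mid) = pvRun g [y] (yt.take (mid - 1)) := by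
        rw [htake]
        exact ih y _ (by simp only [List.length_cons, List.length_take]; omega)
      have hright : pvSplit g (ys.drop mid) = pvRun g [v0] vt := by
        rw [hv]
        exact ih v0 vt (by simp only [List.length_cons]; omega)
      -- the two midpoint elements
      have hysmid : PySem.List.pyGetD ys (mid : Int) [] = v0 := by
        have h1' : ys[mid]? = some v0 := by
          have h2' : (ys.drop mid)[0]? = ys[mid + 0]? := List.getElem?_drop
          rw [hv] at h2'
          simpa using h2'.symm
        rw [PySem.List.pyGetD_natCast, List.getD_eq_getElem _ _ hmidlt, ← Option.some_inj,
          ← List.getElem?_eq_getElem hmidlt, h1']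
      have hysmid1 : PySem.List.pyGetD ys ((mid : Int) - 1) [] = (ys.take mid).getLastD [] := by
        rw [show (mid : Int) - 1 = ((mid - 1 : Nat) : Int) by omega, PySem.List.pyGetD_natCast,
          List.getD_eq_getElem _ _ (by omega : mid - 1 < ys.length)]
        have hne : ys.take mid ≠ [] := by rw [htake]; simp
        rw [pvGetLastD_eq_getLast _ _ hne, List.getLast_eq_getElem, List.getElem_take]
        congr 1
        simp only [List.length_take]
        omega
      -- split yt at mid - 1 and account for the fold over the concatenation
      have hsplit : yt = yt.take (mid - 1) ++ (v0 :: vt) := by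
        rw [← hv, hdrop, List.take_append_drop]
      set L := pvRun g [y] (yt.take (mid - 1)) with hL
      have hLne : L ≠ [] := pvRun_ne_nil g _ _
      have hLlast : (L.getLastD []).getLastD [] = (ys.take mid).getLastD [] := by
        rw [hL, pvRun_last_elem g _ [y] (by simp), htake]
        rfl
      have hrun : pvRun g [y] yt = L.dropLast ++ pvRun g (L.getLastD []) (v0 :: vt) := by
        conv_lhs => rw [hsplit]
        exact pvRun_append g _ _ [y]
      rw [hrun, hleft, hright, hysmid, hysmid1]
      simp only [pvRun]
      by_cases hgap : pyTs v0 - pyTs ((ys.take mid).getLastD []) > g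
      · rw [if_pos hgap, if_pos (by rw [hLlast]; exact hgap)]
        rw [pvGetLastD_eq_getLast L [] hLne, List.append_cons,
          List.dropLast_concat_getLast hLne]
      · rw [if_neg hgap, if_neg (by rw [hLlast]; exact hgap)]
        rw [pvRun_prefix g vt (L.getLastD []) [v0] (by simp)]
        set R := pvRun g [v0] vt with hR
        have hRne : R ≠ [] := pvRun_ne_nil g _ _
        obtain ⟨r0, rt, hr0⟩ := List.exists_cons_of_ne_nil hRne
        rw [hr0]
        simp only [List.modifyHead_cons]
        rw [PySem.List.slice_to_neg_one, PySem.List.slice_from_one,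
          PySem.List.pyGetD_neg_one _ _ hLne, ← pvGetLastD_eq_getLast L [] hLne]
        simp [PySem.List.pyGetD]

-- ===== VERDICT (by name: the statement is the Claim_ definition above) =====
theorem split_by_time_gap_py_spec : Claim_equal_split_by_time_gap_py := by
  intro emails g _
  unfold Spec_split_by_time_gap_py split_by_time_gap_py split_by_time_gap_py_alt
  by_cases he : emails.isEmpty
  · rw [if_pos he]
    rw [List.isEmpty_iff] at he
    rw [he, (PySem.List.sorted_eq_nil_iff _ _ _).mpr rfl, pvSplit]
    simp
  · rw [if_neg he]
    rw [Bool.not_eq_true, List.isEmpty_eq_false_iff] at he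
    generalize hsort : PySem.List.sorted emails pyTs false = s
    have hne : s ≠ [] := by
      rw [← hsort, Ne, PySem.List.sorted_eq_nil_iff]
      exact he
    obtain ⟨s0, st, hs⟩ := List.exists_cons_of_ne_nil hne
    rw [hs, pvSplit_eq_run g (s0 :: st).length s0 st (le_refl _)]
    have h0 : PySem.List.pyGetD (s0 :: st) 0 [] = s0 := by
      simp [PySem.List.pyGetD]
    simp only [PySem.List.slice_from_one, List.tail_cons, h0]
    exact (pvFold_eq_run g st [] [s0] (by simp)).trans (List.nil_append _)
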